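-- pv_equiv track=rewrite | github.com/x35yao/TP-Transformer-assembly | src/tp_transformer/utils.py | create_chunks_of_indices
-- ===== SOURCE A (Python) =====
-- from typing import Dict, Iterable, List, Tuple
--
-- def create_chunks_of_indices(size: int, total: int, splits: int) -> List[List[int]]:
--     """Create overlapping chunks of indices for cross-validation.
--
--     Divides `total` indices into `splits` chunks of `size` each,
--     wrapping around if needed. Used for model_copies / kth_copy selection.
--     """
--     offset = int(total / splits)
--     all_indices = list(range(total))
--     output = []
--     for i in range(splits):
--         holder = all_indices[offset * i : offset * i + size] + all_indices[: max(offset * i + size - total, 0)]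
--         output.append(sorted(holder))
--     return output
-- ===== SOURCE B (Python) =====
-- from typing import List
--
--
-- def _merge(xs: List[int], ys: List[int]) -> List[int]:
--     """Merge two already-sorted int lists into one sorted list."""
--     out = []
--     i = j = 0
--     while i < len(xs) and j < len(ys):
--         if xs[i] <= ys[j]:
--             out.append(xs[i]); i += 1
--         else:
--             out.append(ys[j]); j += 1
--     out.extend(xs[i:])
--     out.extend(ys[j:])
--     return out
--
--
-- def create_chunks_of_indices(size: int, total: int, splits: int) -> List[List[int]]:
--     """Create overlapping chunks of indices for cross-validation.
--
--     Each chunk is built directly as two already-sorted runs (the wrap-around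
--     prefix and the main slice) merged in linear time, with no sort call.
--     """
--     offset = total // splits
--     output = []
--     for i in range(splits):
--         a = offset * i
--         main = list(range(max(a, 0), min(a + size, total)))
--         wrap = list(range(min(max(a + size - total, 0), total)))
--         output.append(_merge(wrap, main))
--     return output
-- ===== Notes on version B (the rewrite author's own statement) =====
-- stated objective: alternative
-- what changed: B never materialises list(range(total)) and never calls sorted: each chunk is produced directly as two already-sorted runs (the wrap-around prefix range and the main slice range) combined by a linear two-pointer merge.
-- outside the precondition, e.g. on create_chunks_of_indices(-1, 5, 2): A returns [[0, 1, 2, 3], []], B returns [[], []]; on create_chunks_of_indices(-2, 7, 3): A returns [[0, 1, 2, 3, 4], [], []], B returns [[], [], []]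
import Mathlib
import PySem

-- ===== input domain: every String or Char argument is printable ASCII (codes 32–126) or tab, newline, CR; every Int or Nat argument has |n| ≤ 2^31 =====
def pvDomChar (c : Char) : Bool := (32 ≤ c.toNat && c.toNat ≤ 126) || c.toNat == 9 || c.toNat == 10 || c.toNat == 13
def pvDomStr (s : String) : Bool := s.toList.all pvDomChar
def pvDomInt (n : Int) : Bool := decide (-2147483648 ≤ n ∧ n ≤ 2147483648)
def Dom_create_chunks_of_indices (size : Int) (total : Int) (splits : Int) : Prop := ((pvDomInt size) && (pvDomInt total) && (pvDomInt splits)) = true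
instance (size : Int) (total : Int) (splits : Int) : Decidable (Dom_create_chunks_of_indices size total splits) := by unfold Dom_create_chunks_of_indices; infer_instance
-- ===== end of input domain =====

-- B replaces A's per-chunk 'sorted' call by a linear two-pointer merge of the two
-- already-sorted runs (wrap-around prefix, main slice), built directly as ranges.

-- ===== PORT A =====
def create_chunks_of_indices (size : Int) (total : Int) (splits : Int) : List (List Int) :=
  -- int(total / splits): true float division then truncation; PySem.Int.truncdiv is exact here
  -- since |total|, |splits| ≤ 2^31 < 2^53 on the stated domain
  let offset := PySem.Int.truncdiv total splits
  let all_indices := PySem.List.pyRange 0 total 1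
  (PySem.List.pyRange 0 splits 1).foldl (fun output i =>
    output ++ [PySem.List.sorted
      (PySem.List.slice all_indices (some (offset * i)) (some (offset * i + size)) ++
       PySem.List.slice all_indices none (some (max (offset * i + size - total) 0)))
      (fun x => x)]) []

-- ===== PORT B =====
-- Source B's _merge: two-pointer merge of two already-sorted lists
def mergeTwo : List Int → List Int → List Int
  | [], ys => ys
  | x :: xs, [] => x :: xs
  | x :: xs, y :: ys =>
    if x ≤ y then x :: mergeTwo xs (y :: ys) else y :: mergeTwo (x :: xs) ys

def create_chunks_of_indices_alt (size : Int) (total : Int) (splits : Int) : List (List Int) :=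
  let offset := PySem.Int.floordiv total splits
  (PySem.List.pyRange 0 splits 1).foldl (fun output i =>
    let a := offset * i
    let main := PySem.List.pyRange (max a 0) (min (a + size) total) 1
    let wrap := PySem.List.pyRange 0 (min (max (a + size - total) 0) total) 1
    output ++ [mergeTwo wrap main]) []

-- ===== PRECONDITION & SPEC =====
-- Pre_ excludes splits = 0 (A raises ZeroDivisionError, and so does B) and, for positive
-- splits, the inputs with negative size but positive total, outside the natural
-- cross-validation domain: there A still returns values produced by Python's negative-index
-- slice wraparound, an artefact of A's slicing which B does not mimic.
def Pre_create_chunks_of_indices (size : Int) (total : Int) (splits : Int) : Prop :=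
  splits < 0 ∨ (0 < splits ∧ (0 ≤ size ∨ total ≤ 0))
instance (size : Int) (total : Int) (splits : Int) : Decidable (Pre_create_chunks_of_indices size total splits) := by unfold Pre_create_chunks_of_indices; infer_instance

def pvWitness_create_chunks_of_indices : Int × Int × Int := (3, 10, 3)

def Spec_create_chunks_of_indices (size : Int) (total : Int) (splits : Int) (out : List (List Int)) : Prop := out = create_chunks_of_indices_alt size total splits
instance (size : Int) (total : Int) (splits : Int) (out : List (List Int)) : Decidable (Spec_create_chunks_of_indices size total splits out) := by unfold Spec_create_chunks_of_indices; infer_instance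

-- ===== CLAIM (what is proved, stated in full; the proofs are below) =====
def Claim_equal_create_chunks_of_indices : Prop := ∀ (size : Int) (total : Int) (splits : Int), Dom_create_chunks_of_indices size total splits → Pre_create_chunks_of_indices size total splits → Spec_create_chunks_of_indices size total splits (create_chunks_of_indices size total splits)

-- ===== LEMMAS AND PROOFS =====
theorem take_pyRange (a b : Int) (m : Nat) :
    (PySem.List.pyRange a b 1).take m = PySem.List.pyRange a (min (a + m) b) 1 := by
  apply List.ext_getElem
  · simp only [List.length_take, PySem.List.length_pyRange_one]; omega
  · intro k h1 h2
    rw [List.getElem_take, PySem.List.getElem_pyRange_one, PySem.List.getElem_pyRange_one]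

theorem drop_pyRange (a b : Int) (m : Nat) :
    (PySem.List.pyRange a b 1).drop m = PySem.List.pyRange (min (a + m) b) b 1 := by
  apply List.ext_getElem
  · simp only [List.length_drop, PySem.List.length_pyRange_one]; omega
  · intro k h1 h2
    rw [List.getElem_drop, PySem.List.getElem_pyRange_one, PySem.List.getElem_pyRange_one]
    have h3 := h1
    simp only [List.length_drop, PySem.List.length_pyRange_one] at h3
    push_cast
    omega

theorem mergeTwo_perm (xs ys : List Int) : (mergeTwo xs ys).Perm (xs ++ ys) := by
  fun_induction mergeTwo xs ys with
  | case1 ys => simp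
  | case2 x xs => simp
  | case3 x xs y ys h ih => exact ih.cons x
  | case4 x xs y ys h ih => exact (ih.cons y).trans List.perm_middle.symm

theorem mergeTwo_pairwise (xs ys : List Int) (hx : xs.Pairwise (· ≤ ·)) (hy : ys.Pairwise (· ≤ ·)) :
    (mergeTwo xs ys).Pairwise (· ≤ ·) := by
  fun_induction mergeTwo xs ys with
  | case1 ys => exact hy
  | case2 x xs => exact hx
  | case3 x xs y ys h ih =>
    rcases List.pairwise_cons.mp hx with ⟨hx1, hx2⟩
    rcases List.pairwise_cons.mp hy with ⟨hy1, hy2⟩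
    refine List.pairwise_cons.mpr ⟨?_, ih hx2 hy⟩
    intro b hb
    rcases List.mem_append.mp ((mergeTwo_perm xs (y :: ys)).mem_iff.mp hb) with h1 | h2
    · exact hx1 b h1
    · rcases List.mem_cons.mp h2 with rfl | h3
      · exact h
      · exact h.trans (hy1 b h3)
  | case4 x xs y ys h ih =>
    rcases List.pairwise_cons.mp hx with ⟨hx1, hx2⟩
    rcases List.pairwise_cons.mp hy with ⟨hy1, hy2⟩
    refine List.pairwise_cons.mpr ⟨?_, ih hx hy2⟩
    intro b hb
    rcases List.mem_append.mp ((mergeTwo_perm (x :: xs) ys).mem_iff.mp hb) with h1 | h2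
    · rcases List.mem_cons.mp h1 with rfl | h3
      · omega
      · exact le_of_lt (lt_of_lt_of_le (lt_of_not_ge h) (hx1 b h3))
    · exact hy1 b h2

-- one chunk: A's sorted(slice + wrap-slice) equals B's merge of the two ranges
theorem chunk_eq (size total a : Int) (hs : 0 ≤ size) (_ht : 0 ≤ total) (ha : 0 ≤ a)
    (hat : a ≤ total) :
    PySem.List.sorted
      (PySem.List.slice (PySem.List.pyRange 0 total 1) (some a) (some (a + size)) ++
       PySem.List.slice (PySem.List.pyRange 0 total 1) none (some (max (a + size - total) 0)))
      (fun x => x)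
    = mergeTwo (PySem.List.pyRange 0 (min (max (a + size - total) 0) total) 1)
               (PySem.List.pyRange (max a 0) (min (a + size) total) 1) := by
  rw [max_eq_left ha]
  have hmain : PySem.List.slice (PySem.List.pyRange 0 total 1) (some a) (some (a + size)) =
      PySem.List.pyRange a (min (a + size) total) 1 := by
    rw [PySem.List.slice_toNat _ ha (by omega : (0:Int) ≤ a + size), drop_pyRange, take_pyRange]
    congr 2 <;> omega
  have hwrap : PySem.List.slice (PySem.List.pyRange 0 total 1) none
      (some (max (a + size - total) 0)) =
      PySem.List.pyRange 0 (min (max (a + size - total) 0) total) 1 := by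
    rw [PySem.List.slice_to _ (by omega : (0:Int) ≤ max (a + size - total) 0), take_pyRange]
    congr 2 <;> omega
  rw [hmain, hwrap]
  apply PySem.List.sorted_id_eq_of_perm_of_pairwise
  · exact (mergeTwo_perm _ _).trans List.perm_append_comm
  · exact mergeTwo_pairwise _ _
      ((PySem.List.pairwise_lt_pyRange_one _ _).imp le_of_lt)
      ((PySem.List.pairwise_lt_pyRange_one _ _).imp le_of_lt)

-- ===== VERDICT (by name: the statement is the Claim_ definition above) =====
theorem create_chunks_of_indices_spec : Claim_equal_create_chunks_of_indices := by
  intro size total splits _ hpre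
  unfold Spec_create_chunks_of_indices create_chunks_of_indices create_chunks_of_indices_alt
  rcases hpre with hneg | ⟨hpos, hcase⟩
  · rw [show PySem.List.pyRange 0 splits 1 = [] from PySem.List.pyRange_one_eq_nil (by omega)]
    rfl
  · rw [PySem.List.foldl_append_singleton_eq_map, PySem.List.foldl_append_singleton_eq_map]
    simp only [List.nil_append]
    apply List.map_congr_left
    intro i hi
    rcases (PySem.List.mem_pyRange_one).mp hi with ⟨hi0, hilt⟩
    by_cases htot : 0 < total
    · have hsz : 0 ≤ size := hcase.resolve_right (by omega)
      have hoff : PySem.Int.truncdiv total splits = PySem.Int.floordiv total splits := by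
        rw [PySem.Int.floordiv_eq_ediv_of_pos hpos]
        exact Int.tdiv_eq_ediv_of_nonneg (by omega)
      rw [hoff]
      have hoffnn : 0 ≤ PySem.Int.floordiv total splits := by
        rw [PySem.Int.floordiv_eq_ediv_of_pos hpos]
        exact Int.ediv_nonneg (by omega) (by omega)
      have hat : PySem.Int.floordiv total splits * i ≤ total := by
        have h1 : PySem.Int.floordiv total splits * i ≤ PySem.Int.floordiv total splits * splits :=
          mul_le_mul_of_nonneg_left (le_of_lt hilt) hoffnn
        have h2 : PySem.Int.floordiv total splits * splits ≤ total := by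
          rw [PySem.Int.floordiv_eq_ediv_of_pos hpos]
          exact Int.ediv_mul_le total (by omega)
        omega
      exact chunk_eq size total _ hsz (by omega) (mul_nonneg hoffnn hi0) hat
    · -- total ≤ 0: A's index list is empty and both sides give the empty chunk
      rw [show PySem.List.pyRange 0 total 1 = [] from PySem.List.pyRange_one_eq_nil (by omega)]
      obtain ⟨aB, haB⟩ : ∃ x, PySem.Int.floordiv total splits * i = x := ⟨_, rfl⟩
      rw [haB,
        show PySem.List.pyRange 0 (min (max (aB + size - total) 0) total) 1 = [] from
          PySem.List.pyRange_one_eq_nil (by omega),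
        show PySem.List.pyRange (max aB 0) (min (aB + size) total) 1 = [] from
          PySem.List.pyRange_one_eq_nil (by omega)]
      simp [PySem.List.slice, PySem.List.sorted, mergeTwo]
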